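-- pv_equiv track=rewrite | github.com/antoinelemor/Transcribe-tool | transcribe_tool/utils/tokenizer.py | _merge_lowercase_fragments
-- ===== SOURCE A (Python) =====
-- from typing import List, Optional, Dict, Any
--
-- def _merge_lowercase_fragments(sentences: List[str]) -> List[str]:
--     """Merge sentence fragments that start with lowercase."""
--     if not sentences or len(sentences) < 2:
--         return sentences
--
--     merged = []
--     i = 0
--
--     while i < len(sentences):
--         current = sentences[i]
--
--         while i + 1 < len(sentences):
--             next_sent = sentences[i + 1].strip()
--             if next_sent and next_sent[0].islower():
--                 current = current.rstrip() + ' ' + next_sent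
--                 i += 1
--             else:
--                 break
--
--         merged.append(current)
--         i += 1
--
--     return merged
-- ===== SOURCE B (Python) =====
-- from typing import List
--
-- def _merge_lowercase_fragments(sentences: List[str]) -> List[str]:
--     """Merge sentence fragments that start with lowercase."""
--     if not sentences or len(sentences) < 2:
--         return sentences
--     merged = []
--     for s in sentences:
--         stripped = s.strip()
--         if merged and stripped and stripped[0].islower():
--             merged[-1] = merged[-1].rstrip() + ' ' + stripped
--         else:
--             merged.append(s)
--     return merged
-- ===== Notes on version B (the rewrite author's own statement) =====
-- stated objective: simpler
-- what changed: Replaced the index-based outer while loop with a nested look-ahead while loop by a single forward for-loop that looks back at the accumulator and merges each lowercase-starting fragment into the last emitted sentence.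
import Mathlib
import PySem

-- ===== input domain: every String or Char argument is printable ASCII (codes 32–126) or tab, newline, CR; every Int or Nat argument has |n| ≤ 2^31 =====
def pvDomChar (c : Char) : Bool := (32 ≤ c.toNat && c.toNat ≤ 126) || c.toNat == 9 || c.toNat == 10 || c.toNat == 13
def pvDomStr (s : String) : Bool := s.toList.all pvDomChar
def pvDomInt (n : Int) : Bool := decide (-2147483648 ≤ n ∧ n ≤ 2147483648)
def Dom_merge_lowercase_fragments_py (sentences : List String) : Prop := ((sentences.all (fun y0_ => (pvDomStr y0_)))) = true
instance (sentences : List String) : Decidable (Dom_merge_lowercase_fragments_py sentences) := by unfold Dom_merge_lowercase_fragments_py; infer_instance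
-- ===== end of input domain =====

-- B replaces A's index-based outer while with nested look-ahead inner while by a single
-- forward loop that looks back at the accumulator and merges into its last element (simpler; same value).

-- `x[0].islower()` on a string known non-empty (both Pythons contain this expression)
def pvStartsLower (ns : String) : Bool :=
  match ns.toList with
  | [] => false
  | c :: _ => PySem.Chars.islower c

-- ===== PORT A =====
-- A's inner `while i + 1 < len(sentences)` loop: state = (current, remaining suffix after i)
def pvAInner (current : String) (rest : List String) : String × List String :=
  match rest with
  | [] => (current, rest)
  | n :: rest' =>
      let next_sent := PySem.Str.strip n
      if next_sent ≠ "" ∧ pvStartsLower next_sent = true then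
        pvAInner (PySem.Str.rstrip current ++ " " ++ next_sent) rest'
      else
        (current, rest)

theorem pvAInner_len (current : String) (rest : List String) :
    (pvAInner current rest).2.length ≤ rest.length := by
  induction rest generalizing current with
  | nil => simp [pvAInner]
  | cons n rest' ih =>
      simp only [pvAInner]
      split
      · exact le_trans (ih _) (Nat.le_succ _)
      · simp

-- A's outer `while i < len(sentences)` loop over the remaining suffix
def pvAOuter (sentences : List String) : List String :=
  match sentences with
  | [] => []
  | c :: rest =>
      (pvAInner c rest).1 :: pvAOuter (pvAInner c rest).2
termination_by sentences.length
decreasing_by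
  have := pvAInner_len c rest
  simp
  omega

def merge_lowercase_fragments_py (sentences : List String) : List String :=
  if sentences = [] ∨ sentences.length < 2 then sentences
  else pvAOuter sentences

-- ===== PORT B =====
-- B's loop body: look back at the accumulator, merge into its last element or append raw s
def pvBStep (merged : List String) (s : String) : List String :=
  let stripped := PySem.Str.strip s
  if merged ≠ [] ∧ stripped ≠ "" ∧ pvStartsLower stripped = true then
    merged.dropLast ++ [PySem.Str.rstrip merged.getLast! ++ " " ++ stripped]
  else
    merged ++ [s]

def merge_lowercase_fragments_py_alt (sentences : List String) : List String :=
  if sentences = [] ∨ sentences.length < 2 then sentences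
  else sentences.foldl pvBStep []

-- ===== PRECONDITION & SPEC =====
def Spec_merge_lowercase_fragments_py (sentences : List String) (out : List String) : Prop := out = merge_lowercase_fragments_py_alt sentences
instance (sentences : List String) (out : List String) : Decidable (Spec_merge_lowercase_fragments_py sentences out) := by unfold Spec_merge_lowercase_fragments_py; infer_instance

-- ===== CLAIM (what is proved, stated in full; the proofs are below) =====
def Claim_equal_merge_lowercase_fragments_py : Prop := ∀ (sentences : List String), Dom_merge_lowercase_fragments_py sentences → Spec_merge_lowercase_fragments_py sentences (merge_lowercase_fragments_py sentences)

-- ===== LEMMAS AND PROOFS =====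
theorem pvBStep_append (acc : List String) (c n : String) :
    pvBStep (acc ++ [c]) n =
      (let ns := PySem.Str.strip n
       if ns ≠ "" ∧ pvStartsLower ns = true then
         acc ++ [PySem.Str.rstrip c ++ " " ++ ns]
       else (acc ++ [c]) ++ [n]) := by
  simp only [pvBStep]
  split
  · rename_i h
    split
    · simp
    · rename_i h'
      exact absurd ⟨h.2.1, h.2.2⟩ h'
  · rename_i h
    split
    · rename_i h'
      exact absurd ⟨by simp, h'.1, h'.2⟩ h
    · rfl

theorem pvFoldl_eq_pvAOuter (l : List String) (acc : List String) (c : String) :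
    List.foldl pvBStep (acc ++ [c]) l =
      acc ++ (pvAInner c l).1 :: pvAOuter (pvAInner c l).2 := by
  induction l generalizing acc c with
  | nil => simp [pvAInner, pvAOuter]
  | cons n t ih =>
      simp only [List.foldl_cons, pvBStep_append, pvAInner]
      split
      · rw [ih]
      · rw [ih (acc ++ [c]) n]
        simp [pvAOuter]

-- ===== VERDICT (by name: the statement is the Claim_ definition above) =====
theorem merge_lowercase_fragments_py_spec : Claim_equal_merge_lowercase_fragments_py := by
  intro sentences _
  unfold Spec_merge_lowercase_fragments_py merge_lowercase_fragments_py merge_lowercase_fragments_py_alt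
  split
  · rfl
  · rename_i h
    match sentences, h with
    | c :: rest, _ =>
        have hfirst : pvBStep [] c = [] ++ [c] := by
          simp only [pvBStep]
          split
          · rename_i hc; exact absurd rfl hc.1
          · rfl
        simp only [List.foldl_cons, hfirst, List.nil_append]
        rw [pvAOuter]
        have h2 := pvFoldl_eq_pvAOuter rest [] c
        rw [List.nil_append] at h2
        exact h2.symm
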